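-- pv_equiv track=rewrite | github.com/Mokhtar2121/Premier_league_Setting_Up_the_sql_database | ddgb.py | FullnameDivider
-- ===== SOURCE A (Python) =====
-- def FullnameDivider(input):  ## divide into first name and last name
--
--     first = ""
--     second = ""
--     cur = False
--     for i in input:
--         if (i == ' '): cur = True
--         if (cur == False):
--             first += i
--         else:
--             second += i
--
--     return (first, second)
-- ===== SOURCE B (Python) =====
-- def FullnameDivider(input):  ## divide into first name and last name
--     idx = input.find(' ')
--     if idx == -1:
--         return (input, "")
--     return (input[:idx], input[idx:])
-- ===== Notes on version B (the rewrite author's own statement) =====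
-- stated objective: faster
-- what changed: Replaces the char-by-char state-machine loop with str.find of the first space plus two slices; no loop, no flag, no per-char string concatenation.
import Mathlib
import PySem

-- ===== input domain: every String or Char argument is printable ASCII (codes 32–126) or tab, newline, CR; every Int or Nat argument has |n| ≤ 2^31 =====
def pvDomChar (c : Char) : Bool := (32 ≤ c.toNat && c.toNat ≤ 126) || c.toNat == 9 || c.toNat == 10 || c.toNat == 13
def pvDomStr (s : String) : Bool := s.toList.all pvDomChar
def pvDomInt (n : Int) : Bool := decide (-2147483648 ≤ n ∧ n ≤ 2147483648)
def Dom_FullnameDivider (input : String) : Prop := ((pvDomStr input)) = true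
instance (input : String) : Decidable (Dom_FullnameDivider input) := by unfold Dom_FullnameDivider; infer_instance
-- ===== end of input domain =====

-- B replaces A's char-by-char flag loop with find-first-space plus two slices (simpler decomposition).


-- ===== PORT A =====
-- the loop body: set cur on a space, then append the char to first or second
def pvStepA (st : List Char × List Char × Bool) (i : Char) : List Char × List Char × Bool :=
  let cur := if i = ' ' then true else st.2.2
  if cur = false then (st.1 ++ [i], st.2.1, cur) else (st.1, st.2.1 ++ [i], cur)

def FullnameDivider (input : String) : String × String :=
  let st := input.toList.foldl pvStepA ([], [], false)
  (String.ofList st.1, String.ofList st.2.1)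

-- ===== PORT B =====
def FullnameDivider_alt (input : String) : String × String :=
  let idx := PySem.Str.find input " "
  if idx = -1 then (input, "")
  else (PySem.Str.slice input none (some idx), PySem.Str.slice input (some idx) none)

-- ===== PRECONDITION & SPEC =====
def Spec_FullnameDivider (input : String) (out : String × String) : Prop := out = FullnameDivider_alt input
instance (input : String) (out : String × String) : Decidable (Spec_FullnameDivider input out) := by unfold Spec_FullnameDivider; infer_instance

-- ===== CLAIM (what is proved, stated in full; the proofs are below) =====
def Claim_equal_FullnameDivider : Prop := ∀ (input : String), Dom_FullnameDivider input → Spec_FullnameDivider input (FullnameDivider input)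

-- ===== LEMMAS AND PROOFS =====

-- once cur is true, everything goes to second
theorem pvFoldA_true (l : List Char) (f s : List Char) :
    l.foldl pvStepA (f, s, true) = (f, s ++ l, true) := by
  induction l generalizing s with
  | nil => simp
  | cons c t ih => simp [pvStepA, ih]

-- while no space has been seen, everything goes to first
theorem pvFoldA_false (l : List Char) (f s : List Char) (h : ∀ c ∈ l, c ≠ ' ') :
    l.foldl pvStepA (f, s, false) = (f ++ l, s, false) := by
  induction l generalizing f with
  | nil => simp
  | cons c t ih =>
    have hc : c ≠ ' ' := h c (by simp)
    have ht : ∀ c ∈ t, c ≠ ' ' := fun x hx => h x (by simp [hx])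
    simp [pvStepA, hc, ih _ ht]

theorem pvFoldA_split (l1 l2 : List Char) (h : ∀ c ∈ l1, c ≠ ' ') :
    (l1 ++ ' ' :: l2).foldl pvStepA ([], [], false) = (l1, ' ' :: l2, true) := by
  rw [List.foldl_append, pvFoldA_false l1 [] [] h]
  simp [pvStepA, pvFoldA_true]

theorem FullnameDivider_spec_aux (input : String) :
    FullnameDivider input = FullnameDivider_alt input := by
  unfold FullnameDivider FullnameDivider_alt
  by_cases h : PySem.Str.find input " " = -1
  · -- no space in the string
    have hinf : ¬ ([' '] <:+: input.toList) := by
      have := (PySem.Str.find_eq_neg_one_iff input " ").mp h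
      simpa using this
    have hns : ∀ c ∈ input.toList, c ≠ ' ' := by
      intro c hc hce
      subst hce
      obtain ⟨p, q, hpq⟩ := List.append_of_mem hc
      exact hinf ⟨p, q, by simpa using hpq.symm⟩
    have h' : PySem.Chars.find input.toList [' '] = -1 := by
      simpa [PySem.Str.find_eq] using h
    simp [h', pvFoldA_false input.toList [] [] hns]
  · -- a space exists; find points at the first one
    have hnn : 0 ≤ PySem.Chars.find input.toList [' '] := by
      have := PySem.Chars.neg_one_le_find input.toList [' ']
      have h' : PySem.Chars.find input.toList [' '] ≠ -1 := by
        simpa [PySem.Str.find_eq] using h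
      omega
    obtain ⟨hpre, hmin⟩ := PySem.Chars.find_spec (s := input.toList) (sub := [' ']) hnn
    set n := (PySem.Chars.find input.toList [' ']).toNat with hn
    -- the char at the found index is a space
    obtain ⟨rest, hdrop⟩ : ∃ rest, input.toList.drop n = ' ' :: rest := by
      obtain ⟨t, ht⟩ := hpre
      exact ⟨t, by simpa using ht.symm⟩
    have htake : ∀ c ∈ input.toList.take n, c ≠ ' ' := by
      intro c hc hce
      subst hce
      obtain ⟨i, hi, hgi⟩ := List.mem_iff_getElem.mp hc
      have hin : i < n := lt_of_lt_of_le hi (by simp)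
      have hilen : i < input.toList.length := lt_of_lt_of_le hi (by simp)
      apply hmin i hin
      refine ⟨input.toList.drop (i+1), ?_⟩
      rw [List.drop_eq_getElem_cons hilen]
      have hgi' : input.toList[i] = ' ' := by
        simpa [List.getElem_take] using hgi
      simp [hgi']
    have hsplitl : input.toList = input.toList.take n ++ ' ' :: rest := by
      conv_lhs => rw [← List.take_append_drop n input.toList]
      rw [hdrop]
    have hfold : input.toList.foldl pvStepA ([], [], false)
        = (input.toList.take n, ' ' :: rest, true) := by
      conv_lhs => rw [hsplitl]
      exact pvFoldA_split _ rest htake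
    have hfind : PySem.Str.find input " " = ((n : Nat) : Int) := by
      simp only [PySem.Str.find_eq, hn]
      have hws : (" " : String).toList = [' '] := rfl
      rw [hws, Int.toNat_of_nonneg hnn]
    rw [hfold, hfind]
    rw [if_neg (by omega)]
    refine Prod.ext ?_ ?_ <;> apply String.toList_injective
    · simp [PySem.Str.toList_slice, PySem.List.slice_to_natCast]
    · simp [PySem.Str.toList_slice, PySem.List.slice_from_natCast, hdrop]

-- ===== VERDICT (by name: the statement is the Claim_ definition above) =====
theorem FullnameDivider_spec : Claim_equal_FullnameDivider := by
  intro input _; exact FullnameDivider_spec_aux input
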